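-- pv_equiv track=rewrite | github.com/MatteoLacki/mainzer | mainzer/molecule_filters.py | iter_charge_sequence_groups
-- ===== SOURCE A (Python) =====
-- def iter_charge_sequence_groups(x, min_len=1):
--     x = iter(x)
--     prev = next(x)
--     cluster = [0]
--     for i, curr in enumerate(x, 1):
--         if curr == prev + 1:
--             cluster.append(i)
--         else:
--             if len(cluster) >= min_len:
--                 yield cluster
--             cluster = [i]
--         prev = curr
--     if len(cluster) >= min_len:
--         yield cluster
-- ===== SOURCE B (Python) =====
-- def iter_charge_sequence_groups(x, min_len=1):
--     xs = list(x)
--     n = len(xs)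
--     breaks = [0] + [i for i in range(1, n) if xs[i] != xs[i - 1] + 1] + [n]
--     for a, b in zip(breaks, breaks[1:]):
--         if b - a >= min_len:
--             yield list(range(a, b))
-- ===== Notes on version B (the rewrite author's own statement) =====
-- stated objective: alternative
-- what changed: Instead of A's online scan that accumulates a growing cluster and yields it at each break, B first computes the list of break positions (indices where the +1 chain is broken) and then reconstructs each group arithmetically as range(a, b) between consecutive breaks.
import Mathlib
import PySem

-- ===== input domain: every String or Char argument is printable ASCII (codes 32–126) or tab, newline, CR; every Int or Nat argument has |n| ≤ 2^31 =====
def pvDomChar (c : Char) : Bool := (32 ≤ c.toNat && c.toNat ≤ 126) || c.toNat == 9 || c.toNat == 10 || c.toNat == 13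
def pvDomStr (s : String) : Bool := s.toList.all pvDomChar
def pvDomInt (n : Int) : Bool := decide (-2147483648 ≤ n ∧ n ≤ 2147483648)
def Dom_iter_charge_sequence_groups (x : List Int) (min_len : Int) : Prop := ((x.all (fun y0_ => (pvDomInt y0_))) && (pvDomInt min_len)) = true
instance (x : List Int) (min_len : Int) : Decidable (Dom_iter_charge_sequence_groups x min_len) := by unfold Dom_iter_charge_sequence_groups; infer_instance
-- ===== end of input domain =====

-- B computes the break positions first and rebuilds each group as range(a, b); return-value equivalence with A's online cluster scan on nonempty x.

-- ===== PORT A =====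
-- enumerate(x, n) over a list, with Int indices
def pvEnumInt (n : Int) : List Int → List (Int × Int)
  | [] => []
  | v :: l => (n, v) :: pvEnumInt (n + 1) l

-- A's for-loop: state = (prev, cluster), output appended at each 'yield'
def pvALoop (min_len : Int) : List (Int × Int) → Int → List Int → List (List Int)
  | [], _, cluster => if min_len ≤ (cluster.length : Int) then [cluster] else []
  | (i, curr) :: rest, prev, cluster =>
      if curr = prev + 1 then
        pvALoop min_len rest curr (cluster ++ [i])
      else
        (if min_len ≤ (cluster.length : Int) then [cluster] else []) ++
          pvALoop min_len rest curr [i]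

def iter_charge_sequence_groups (x : List Int) (min_len : Int) : List (List Int) :=
  match x with
  | [] => []  -- excluded by Pre_: Python raises here (next on an empty iterator)
  | first :: rest => pvALoop min_len (pvEnumInt 1 rest) first [0]

-- ===== PORT B =====
def iter_charge_sequence_groups_alt (x : List Int) (min_len : Int) : List (List Int) :=
  let n : Int := x.length
  let breaks : List Int :=
    0 :: (PySem.List.pyRange 1 n 1).filter
          (fun i => !(PySem.List.pyGetD x i 0 == PySem.List.pyGetD x (i - 1) 0 + 1)) ++ [n]
  (breaks.zip (breaks.drop 1)).flatMap
    (fun p => if min_len ≤ p.2 - p.1 then [PySem.List.pyRange p.1 p.2 1] else [])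

-- ===== PRECONDITION & SPEC =====
-- A calls next() on the iterator first, so on the empty list it raises (StopIteration → RuntimeError).
def Pre_iter_charge_sequence_groups (x : List Int) (min_len : Int) : Prop := x ≠ []
instance (x : List Int) (min_len : Int) : Decidable (Pre_iter_charge_sequence_groups x min_len) := by unfold Pre_iter_charge_sequence_groups; infer_instance
def pvWitness_iter_charge_sequence_groups : List Int × Int := ([1, 2, 3, 7, 8], 2)

def Spec_iter_charge_sequence_groups (x : List Int) (min_len : Int) (out : List (List Int)) : Prop := out = iter_charge_sequence_groups_alt x min_len
instance (x : List Int) (min_len : Int) (out : List (List Int)) : Decidable (Spec_iter_charge_sequence_groups x min_len out) := by unfold Spec_iter_charge_sequence_groups; infer_instance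

-- ===== CLAIM (what is proved, stated in full; the proofs are below) =====
def Claim_equal_iter_charge_sequence_groups : Prop := ∀ (x : List Int) (min_len : Int), Dom_iter_charge_sequence_groups x min_len → Pre_iter_charge_sequence_groups x min_len → Spec_iter_charge_sequence_groups x min_len (iter_charge_sequence_groups x min_len)

-- ===== LEMMAS AND PROOFS =====

-- A's groups as an intermediate spec: the list of index-runs, before the length filter
def pvRuns (i prev : Int) (acc : List Int) : List Int → List (List Int)
  | [] => [acc]
  | v :: l => if v = prev + 1 then pvRuns (i + 1) v (acc ++ [i]) l
              else acc :: pvRuns (i + 1) v [i] l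

-- break positions, recursively
def pvBrks (i prev : Int) : List Int → List Int
  | [] => []
  | v :: l => (if v = prev + 1 then [] else [i]) ++ pvBrks (i + 1) v l

-- emit a group [a, b) iff long enough
def pvEmit2 (min_len a b : Int) : List (List Int) :=
  if min_len ≤ b - a then [PySem.List.pyRange a b 1] else []

def pvEmitFrom (min_len a : Int) : List Int → Int → List (List Int)
  | [], e => pvEmit2 min_len a e
  | b :: bs, e => pvEmit2 min_len a b ++ pvEmitFrom min_len b bs e

theorem pvALoop_eq_runs (min_len : Int) :
    ∀ (l : List Int) (i prev : Int) (cluster : List Int),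
      pvALoop min_len (pvEnumInt i l) prev cluster =
        (pvRuns i prev cluster l).flatMap
          (fun c => if min_len ≤ (c.length : Int) then [c] else []) := by
  intro l
  induction l with
  | nil => intro i prev cluster; simp [pvEnumInt, pvALoop, pvRuns]
  | cons v l' ih =>
    intro i prev cluster
    by_cases hv : v = prev + 1 <;>
      simp [pvEnumInt, pvALoop, pvRuns, hv, ih]

theorem pvEmit_range (min_len a b : Int) (h : a ≤ b) :
    (if min_len ≤ ((PySem.List.pyRange a b 1).length : Int)
       then [PySem.List.pyRange a b 1] else []) = pvEmit2 min_len a b := by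
  have hl : ((PySem.List.pyRange a b 1).length : Int) = b - a := by
    rw [PySem.List.length_pyRange_one]; omega
  rw [hl]; rfl

theorem pvRuns_emit (min_len : Int) :
    ∀ (l : List Int) (i prev a : Int), a ≤ i →
      (pvRuns i prev (PySem.List.pyRange a i 1) l).flatMap
          (fun c => if min_len ≤ (c.length : Int) then [c] else []) =
        pvEmitFrom min_len a (pvBrks i prev l) (i + l.length) := by
  intro l
  induction l with
  | nil =>
    intro i prev a ha
    simp only [pvRuns, pvBrks, pvEmitFrom, List.flatMap_cons, List.flatMap_nil,
      List.append_nil, List.length_nil, Int.natCast_zero, add_zero]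
    exact pvEmit_range min_len a i ha
  | cons v l' ih =>
    intro i prev a ha
    by_cases hv : v = prev + 1
    · have hstep : PySem.List.pyRange a i 1 ++ [i] = PySem.List.pyRange a (i + 1) 1 :=
        (PySem.List.pyRange_one_succ_right ha).symm
      have := ih (i + 1) v a (by omega)
      simp only [pvRuns, pvBrks, if_pos hv, hstep, List.nil_append] at this ⊢
      rw [this]
      have : i + 1 + (l'.length : Int) = i + ((l'.length : Int) + 1) := by ring
      simp [this]
    · have hsing : [i] = PySem.List.pyRange i (i + 1) 1 :=
        (PySem.List.pyRange_one_singleton i).symm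
      have hih := ih (i + 1) v i (by omega)
      simp only [pvRuns, pvBrks, if_neg hv, List.flatMap_cons, List.singleton_append,
        pvEmitFrom] at hih ⊢
      rw [hsing, hih, pvEmit_range min_len a i ha]
      have : i + 1 + (l'.length : Int) = i + ((l'.length : Int) + 1) := by ring
      simp [this]

-- the comprehension over range(1, n) computes exactly pvBrks
theorem pvFilter_eq_brks (x : List Int) :
    ∀ (k : Nat) (i : Int), 1 ≤ i → i + k = x.length →
      (PySem.List.pyRange i x.length 1).filter
          (fun j => !(PySem.List.pyGetD x j 0 == PySem.List.pyGetD x (j - 1) 0 + 1)) =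
        pvBrks i (PySem.List.pyGetD x (i - 1) 0) (x.drop i.toNat) := by
  intro k
  induction k with
  | zero =>
    intro i h1 h2
    have he : PySem.List.pyRange i x.length 1 = [] :=
      PySem.List.pyRange_one_eq_nil (by omega)
    have hd : x.drop i.toNat = [] := List.drop_eq_nil_of_le (by omega)
    simp [he, hd, pvBrks]
  | succ k ih =>
    intro i h1 h2
    have hlt : i < x.length := by omega
    have hc : PySem.List.pyRange i x.length 1 = i :: PySem.List.pyRange (i + 1) x.length 1 :=
      PySem.List.pyRange_one_cons hlt
    have hti : i.toNat < x.length := by omega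
    have hd : x.drop i.toNat = x[i.toNat] :: x.drop (i.toNat + 1) :=
      List.drop_eq_getElem_cons hti
    have hget : PySem.List.pyGetD x i 0 = x[i.toNat] :=
      PySem.List.pyGetD_eq_getElem x 0 (by omega) (by omega)
    have hih := ih (i + 1) (by omega) (by omega)
    have hprev : PySem.List.pyGetD x (i + 1 - 1) 0 = PySem.List.pyGetD x i 0 := by
      norm_num
    have htn : (i + 1).toNat = i.toNat + 1 := by omega
    rw [hc, List.filter_cons, hd, pvBrks]
    rw [hih, hprev, htn, hget]
    by_cases hb : x[i.toNat] = PySem.List.pyGetD x (i - 1) 0 + 1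
    · simp [hb]
    · simp [hb]

-- zipped consecutive breaks emit the same groups as pvEmitFrom
theorem pvZip_emit (min_len : Int) :
    ∀ (bs : List Int) (a e : Int),
      (((a :: bs ++ [e]).zip (bs ++ [e])).flatMap
          (fun p => if min_len ≤ p.2 - p.1 then [PySem.List.pyRange p.1 p.2 1] else [])) =
        pvEmitFrom min_len a bs e := by
  intro bs
  induction bs with
  | nil => intro a e; simp [pvEmitFrom, pvEmit2]
  | cons b bs' ih =>
    intro a e
    simp only [List.cons_append, List.zip_cons_cons, List.flatMap_cons, pvEmitFrom]
    rw [show ((b :: (bs' ++ [e])).zip (bs' ++ [e])) = ((b :: bs' ++ [e]).zip (bs' ++ [e])) from rfl]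
    rw [ih b e]
    rfl

-- ===== VERDICT (by name: the statement is the Claim_ definition above) =====
theorem iter_charge_sequence_groups_spec : Claim_equal_iter_charge_sequence_groups := by
  intro x min_len _ hpre
  unfold Spec_iter_charge_sequence_groups
  match x with
  | [] => exact absurd rfl hpre
  | first :: rest =>
    show pvALoop min_len (pvEnumInt 1 rest) first [0] = _
    simp only [iter_charge_sequence_groups_alt]
    rw [show (((0 : Int) :: (PySem.List.pyRange 1 ((first :: rest).length : Int) 1).filter
          (fun i => !(PySem.List.pyGetD (first :: rest) i 0 ==
                      PySem.List.pyGetD (first :: rest) (i - 1) 0 + 1)) ++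
          [((first :: rest).length : Int)]).zip
            (List.drop 1 ((0 : Int) :: (PySem.List.pyRange 1 ((first :: rest).length : Int) 1).filter
              (fun i => !(PySem.List.pyGetD (first :: rest) i 0 ==
                          PySem.List.pyGetD (first :: rest) (i - 1) 0 + 1)) ++
              [((first :: rest).length : Int)]))).flatMap
          (fun p => if min_len ≤ p.2 - p.1 then [PySem.List.pyRange p.1 p.2 1] else []) =
        pvEmitFrom min_len 0
          ((PySem.List.pyRange 1 ((first :: rest).length : Int) 1).filter
            (fun i => !(PySem.List.pyGetD (first :: rest) i 0 ==
                        PySem.List.pyGetD (first :: rest) (i - 1) 0 + 1)))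
          ((first :: rest).length : Int)
      from pvZip_emit min_len _ 0 _]
    have hf : (PySem.List.pyRange 1 ((first :: rest).length : Int) 1).filter
        (fun j => !(PySem.List.pyGetD (first :: rest) j 0 ==
                    PySem.List.pyGetD (first :: rest) (j - 1) 0 + 1)) =
        pvBrks 1 first rest := by
      have := pvFilter_eq_brks (first :: rest) rest.length 1 (by omega) (by simp; omega)
      simpa [PySem.List.pyGetD_zero_cons] using this
    rw [hf]
    rw [pvALoop_eq_runs]
    rw [show [(0 : Int)] = PySem.List.pyRange 0 1 1 from (PySem.List.pyRange_one_singleton 0).symm]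
    rw [pvRuns_emit min_len rest 1 first 0 (by omega)]
    have : ((first :: rest).length : Int) = 1 + (rest.length : Int) := by simp [add_comm]
    rw [this]
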